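-- pv_equiv track=rewrite | github.com/pauljoohyunkim/partC_Dissertation | Lab/PDE/python/TangentPointEnergy/Curve-Repulsion/quadrature4.py | derivative_index
-- ===== SOURCE A (Python) =====
-- def derivative_index(k, J):
--     index_list = []
--     for i in range(J):
--         if abs(k - i) > 1 and abs(k - i + J) > 1 and abs(k - i - J) > 1:
--             index_list.append((k, i))
--     for i in range(J):
--         if abs(k - 1 - i) > 1 and abs(k - 1 - i + J) > 1 and abs(k - 1 - i - J) > 1:
--             index_list.append(((k-1) % J, i))
--     for i in range(J):
--         if abs(k - i) > 1 and abs(k - i + J) > 1 and abs(k - i - J) > 1: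
--             index_list.append((i, k))
--     for i in range(J):
--         if abs(k - 1 - i) > 1 and abs(k - 1 - i + J) > 1 and abs(k - 1 - i - J) > 1:
--             index_list.append((i, (k-1) % J))
--
--
--     return index_list
-- ===== SOURCE B (Python) =====
-- def _complement(c, J):
--     # indices i in [0, J) at circular distance > 1 from c, built as the sorted
--     # complement of the (at most 9) excluded points -- no per-index predicate test
--     bad = sorted({x for b in (c - J, c, c + J) for x in (b - 1, b, b + 1) if 0 <= x < J})
--     out = []
--     prev = -1
--     for x in bad:
--         out.extend(range(prev + 1, x))
--         prev = x
--     out.extend(range(prev + 1, J))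
--     return out
--
--
-- def derivative_index(k, J):
--     if J == 0:
--         return []
--     valid_k = _complement(k, J)
--     valid_km1 = _complement(k - 1, J)
--     km1 = (k - 1) % J
--     return ([(k, i) for i in valid_k]
--             + [(km1, i) for i in valid_km1]
--             + [(i, k) for i in valid_k]
--             + [(i, km1) for i in valid_km1])
-- ===== Notes on version B (the rewrite author's own statement) =====
-- stated objective: faster
-- what changed: B never evaluates A's three-clause circular-distance predicate per index: it computes the at-most-9 excluded index points, sorts them, and emits the complement as contiguous gap ranges (range extends), then assembles the four output passes from the two complement tables.
import Mathlib
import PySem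

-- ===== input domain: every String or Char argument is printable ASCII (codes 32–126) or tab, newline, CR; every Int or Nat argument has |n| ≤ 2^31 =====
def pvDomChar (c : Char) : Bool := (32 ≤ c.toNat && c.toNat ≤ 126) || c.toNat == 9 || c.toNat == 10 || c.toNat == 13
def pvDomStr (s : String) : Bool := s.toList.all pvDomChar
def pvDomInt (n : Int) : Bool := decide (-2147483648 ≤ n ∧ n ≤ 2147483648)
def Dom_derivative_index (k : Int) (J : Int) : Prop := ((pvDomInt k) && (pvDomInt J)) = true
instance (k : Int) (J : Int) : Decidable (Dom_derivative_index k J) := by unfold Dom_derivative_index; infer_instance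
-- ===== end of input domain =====

-- B replaces A's four predicate-filtered scans of range(J) by complement construction:
-- it sorts the at-most-9 excluded index points and emits the gap ranges between them (objective: faster; measured).


-- ===== PORT A =====
def derivative_index (k : Int) (J : Int) : List (Int × Int) :=
  let index_list : List (Int × Int) := []
  let index_list := (PySem.List.pyRange 0 J 1).foldl (fun acc i =>
    if decide (1 < |k - i|) && decide (1 < |k - i + J|) && decide (1 < |k - i - J|)
    then acc ++ [(k, i)] else acc) index_list
  let index_list := (PySem.List.pyRange 0 J 1).foldl (fun acc i =>
    if decide (1 < |k - 1 - i|) && decide (1 < |k - 1 - i + J|) && decide (1 < |k - 1 - i - J|)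
    then acc ++ [(PySem.Int.mod (k - 1) J, i)] else acc) index_list
  let index_list := (PySem.List.pyRange 0 J 1).foldl (fun acc i =>
    if decide (1 < |k - i|) && decide (1 < |k - i + J|) && decide (1 < |k - i - J|)
    then acc ++ [(i, k)] else acc) index_list
  let index_list := (PySem.List.pyRange 0 J 1).foldl (fun acc i =>
    if decide (1 < |k - 1 - i|) && decide (1 < |k - 1 - i + J|) && decide (1 < |k - 1 - i - J|)
    then acc ++ [(i, PySem.Int.mod (k - 1) J)] else acc) index_list
  index_list

-- ===== PORT B =====
-- port of Source B's _complement: sorted excluded points, then the gap ranges between them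
def pvComplement (c : Int) (J : Int) : List Int :=
  let bad := PySem.List.sorted (PySem.Set.ofList
      (([c - J - 1, c - J, c - J + 1, c - 1, c, c + 1, c + J - 1, c + J, c + J + 1]).filter
        (fun x => decide (0 ≤ x) && decide (x < J)))) (fun x => x) false
  let st := bad.foldl (fun (s : Int × List Int) x =>
      (x, s.2 ++ PySem.List.pyRange (s.1 + 1) x 1)) ((-1 : Int), ([] : List Int))
  st.2 ++ PySem.List.pyRange (st.1 + 1) J 1

def derivative_index_alt (k : Int) (J : Int) : List (Int × Int) :=
  if J = 0 then []
  else
    let valid_k := pvComplement k J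
    let valid_km1 := pvComplement (k - 1) J
    let km1 := PySem.Int.mod (k - 1) J
    valid_k.map (fun i => (k, i)) ++ valid_km1.map (fun i => (km1, i)) ++
    valid_k.map (fun i => (i, k)) ++ valid_km1.map (fun i => (i, km1))

-- ===== PRECONDITION & SPEC =====
def Spec_derivative_index (k : Int) (J : Int) (out : List (Int × Int)) : Prop := out = derivative_index_alt k J
instance (k : Int) (J : Int) (out : List (Int × Int)) : Decidable (Spec_derivative_index k J out) := by unfold Spec_derivative_index; infer_instance

-- ===== CLAIM (what is proved, stated in full; the proofs are below) =====
def Claim_equal_derivative_index : Prop := ∀ (k : Int) (J : Int), Dom_derivative_index k J → Spec_derivative_index k J (derivative_index k J)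

-- ===== LEMMAS AND PROOFS =====

-- the gap loop over a strictly increasing list of excluded points in (prev, J)
-- produces exactly the range above prev with those points removed
lemma gap_loop (J : Int) : ∀ (bad : List Int) (prev : Int) (acc : List Int),
    bad.Pairwise (· < ·) → (∀ x ∈ bad, prev < x ∧ x < J) →
    (let st := bad.foldl (fun (s : Int × List Int) x =>
        (x, s.2 ++ PySem.List.pyRange (s.1 + 1) x 1)) (prev, acc)
     st.2 ++ PySem.List.pyRange (st.1 + 1) J 1)
    = acc ++ (PySem.List.pyRange (prev + 1) J 1).filter (fun i => decide (i ∉ bad)) := by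
  intro bad
  induction bad with
  | nil =>
    intro prev acc _ _
    simp
  | cons b bs ih =>
    intro prev acc hpw hmem
    have hb : prev < b ∧ b < J := hmem b (List.mem_cons_self)
    have hbs : ∀ x ∈ bs, b < x := by
      intro x hx; exact (List.pairwise_cons.mp hpw).1 x hx
    have hstep : ∀ x ∈ bs, b < x ∧ x < J := by
      intro x hx
      exact ⟨hbs x hx, (hmem x (List.mem_cons_of_mem _ hx)).2⟩
    simp only [List.foldl_cons]
    rw [ih b (acc ++ PySem.List.pyRange (prev + 1) b 1) (List.pairwise_cons.mp hpw).2 hstep]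
    rw [PySem.List.pyRange_one_append (prev + 1) b J (by omega) (by omega),
        PySem.List.pyRange_one_cons (show (b : Int) < J by omega)]
    rw [List.filter_append]
    have h1 : (PySem.List.pyRange (prev + 1) b 1).filter
        (fun i => decide (i ∉ b :: bs)) = PySem.List.pyRange (prev + 1) b 1 := by
      apply List.filter_eq_self.mpr
      intro x hx
      have hxlt : x < b := ((PySem.List.mem_pyRange_one).mp hx).2
      simp only [decide_eq_true_iff, List.mem_cons]
      push_neg
      exact ⟨by omega, fun hxb => by have := hbs x hxb; omega⟩
    have h2 : (b :: PySem.List.pyRange (b + 1) J 1).filter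
        (fun i => decide (i ∉ b :: bs))
        = (PySem.List.pyRange (b + 1) J 1).filter (fun i => decide (i ∉ bs)) := by
      rw [List.filter_cons]
      rw [show (decide (b ∉ b :: bs)) = false by simp]
      simp only [Bool.false_eq_true, if_false]
      apply List.filter_congr
      intro x hx
      have hxgt : b + 1 ≤ x := ((PySem.List.mem_pyRange_one).mp hx).1
      have hxb : x ≠ b := by omega
      simp [List.mem_cons, hxb]
    rw [h1, h2, List.append_assoc]

-- the complement construction equals A's predicate filter over range(J)
lemma complement_eq (c J : Int) :
    pvComplement c J = (PySem.List.pyRange 0 J 1).filter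
      (fun i => decide (1 < |c - i|) && decide (1 < |c - i + J|) && decide (1 < |c - i - J|)) := by
  unfold pvComplement
  set cand := ([c - J - 1, c - J, c - J + 1, c - 1, c, c + 1, c + J - 1, c + J, c + J + 1]).filter
    (fun x => decide (0 ≤ x) && decide (x < J)) with hcand
  set bad := PySem.List.sorted (PySem.Set.ofList cand) (fun x => x) false with hbad
  have hpw : bad.Pairwise (· < ·) := PySem.List.sorted_ofList_pairwise_lt cand
  have hmem : ∀ x, x ∈ bad ↔ (x ∈ ([c - J - 1, c - J, c - J + 1, c - 1, c, c + 1, c + J - 1, c + J, c + J + 1] : List Int) ∧ 0 ≤ x ∧ x < J) := by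
    intro x
    rw [hbad, PySem.List.mem_sorted, PySem.Set.mem_ofList, hcand, List.mem_filter]
    simp
  have hrange : ∀ x ∈ bad, (-1 : Int) < x ∧ x < J := by
    intro x hx
    have := ((hmem x).mp hx).2
    omega
  rw [gap_loop J bad (-1) [] hpw hrange]
  rw [List.nil_append, show ((-1 : Int) + 1) = 0 by omega]
  apply List.filter_congr
  intro i hi
  have hiR := (PySem.List.mem_pyRange_one).mp hi
  have hchar : i ∈ bad ↔ ¬ (1 < |c - i| ∧ 1 < |c - i + J| ∧ 1 < |c - i - J|) := by
    rw [hmem i]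
    simp only [List.mem_cons, List.not_mem_nil, or_false]
    rw [lt_abs, lt_abs, lt_abs]
    omega
  by_cases hin : i ∈ bad
  · have hnot := hchar.mp hin
    simp only [hin, not_true, decide_false]
    symm
    simp only [Bool.and_eq_false_iff, decide_eq_false_iff_not]
    tauto
  · have hfar := (not_iff_not.mpr hchar).mp hin
    push_neg at hfar
    simp only [hin, not_false_iff, decide_true]
    symm
    rw [Bool.and_eq_true, Bool.and_eq_true]
    exact ⟨⟨decide_eq_true hfar.1, decide_eq_true hfar.2.1⟩, decide_eq_true hfar.2.2⟩

-- ===== VERDICT (by name: the statement is the Claim_ definition above) =====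
theorem derivative_index_spec : Claim_equal_derivative_index := by
  intro k J _
  unfold Spec_derivative_index derivative_index derivative_index_alt
  by_cases hJ : J = 0
  · subst hJ
    simp [PySem.List.pyRange]
  · simp only [if_neg hJ]
    rw [PySem.List.foldl_append_if, PySem.List.foldl_append_if,
        PySem.List.foldl_append_if, PySem.List.foldl_append_if]
    rw [complement_eq k J, complement_eq (k - 1) J]
    simp only [List.nil_append, List.append_assoc]
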